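-- pv_equiv track=rewrite | github.com/YasminTeles/Maratona | 2425_Banco/banco.py | excedeAtendimento
-- ===== SOURCE A (Python) =====
-- def proximoCaixa(caixas):
--     menorTempo = 0
--     for i in range(len(caixas)):
--         if caixas[i] < caixas[menorTempo]:
--             menorTempo = i
--
--     return menorTempo
--
-- def excedeAtendimento(caixa, clientes):
--     caixas = [0] * caixa
--     proximo = 0
--
--     chegada, tempoAtendimento = 0, 1
--     excederam = 0
--
--     for cliente in clientes:
--         tempoEspera = caixas[proximo] - cliente[chegada]
--
--         if tempoEspera < 0:
--             tempoEspera = 0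
--
--         caixas[proximo] = cliente[chegada] + cliente[tempoAtendimento] + tempoEspera
--         proximo = proximoCaixa(caixas)
--
--         if tempoEspera > 20:
--             excederam += 1
--
--     return excederam
-- ===== SOURCE B (Python) =====
-- def excedeAtendimento(caixa, clientes):
--     # Counters are interchangeable: only the multiset of finish times matters.
--     # Keep the finish times sorted; the earliest-available counter is the first
--     # entry, and the new finish time is re-inserted by binary search, so the
--     # per-client argmin scan over all counters disappears.
--     tempos = [0] * caixa  # finish times, kept sorted ascending
--     excederam = 0
--     for chegada, atendimento in clientes:
--         espera = tempos[0] - chegada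
--         if espera < 0:
--             espera = 0
--         if espera > 20:
--             excederam += 1
--         novo = chegada + atendimento + espera
--         del tempos[0]
--         lo, hi = 0, len(tempos)
--         while lo < hi:
--             mid = (lo + hi) // 2
--             if tempos[mid] <= novo:
--                 lo = mid + 1
--             else:
--                 hi = mid
--         tempos.insert(lo, novo)
--     return excederam
-- ===== Notes on version B (the rewrite author's own statement) =====
-- stated objective: faster
-- what changed: B drops the counter array and the per-client linear argmin scan: since counters are interchangeable, it keeps only the sorted list of finish times, serves each client from its head and re-inserts the new finish time by binary search.
import Mathlib
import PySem

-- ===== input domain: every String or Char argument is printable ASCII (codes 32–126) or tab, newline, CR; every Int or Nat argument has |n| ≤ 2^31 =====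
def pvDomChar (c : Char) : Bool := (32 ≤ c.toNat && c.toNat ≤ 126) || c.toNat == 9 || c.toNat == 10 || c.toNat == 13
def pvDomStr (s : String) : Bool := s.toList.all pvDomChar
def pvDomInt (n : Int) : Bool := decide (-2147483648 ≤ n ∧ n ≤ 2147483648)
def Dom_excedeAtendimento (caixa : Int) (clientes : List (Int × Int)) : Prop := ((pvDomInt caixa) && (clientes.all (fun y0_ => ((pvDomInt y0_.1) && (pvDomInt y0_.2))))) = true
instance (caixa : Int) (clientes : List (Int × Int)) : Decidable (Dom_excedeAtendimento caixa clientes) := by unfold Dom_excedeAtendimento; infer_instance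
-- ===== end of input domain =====

-- B replaces the counter array and the per-client argmin scan by a sorted list of
-- finish times (counters are interchangeable); same cost class, different structure.

-- ===== PORT A =====
-- literal port of proximoCaixa: scan all indices keeping the first argmin
def proximoCaixa (caixas : List Int) : Int :=
  (PySem.List.pyRange 0 caixas.length 1).foldl
    (fun menorTempo i =>
      if PySem.List.pyGetD caixas i 0 < PySem.List.pyGetD caixas menorTempo 0 then i
      else menorTempo) 0

-- indices proximo are always ≥ 0 and (under Pre_) in range, so the total forms
-- pyGetD / pySetD are exact here
def excedeAtendimento (caixa : Int) (clientes : List (Int × Int)) : Int :=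
  (clientes.foldl
    (fun (st : List Int × Int × Int) cliente =>
      let caixas := st.1
      let proximo := st.2.1
      let excederam := st.2.2
      let e0 := PySem.List.pyGetD caixas proximo 0 - cliente.1
      let tempoEspera := if e0 < 0 then 0 else e0
      let caixas' := PySem.List.pySetD caixas proximo (cliente.1 + cliente.2 + tempoEspera)
      let proximo' := proximoCaixa caixas'
      let excederam' := if tempoEspera > 20 then excederam + 1 else excederam
      (caixas', proximo', excederam'))
    (List.replicate caixa.toNat 0, 0, 0)).2.2

-- ===== PORT B =====
-- the binary-search loop of Source B: while lo < hi: mid = (lo+hi)//2; …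
-- (lo, hi are Python ints that stay ≥ 0; (lo+hi)//2 on naturals is Nat division)
def insereBinPos (tempos : List Int) (v : Int) (lo hi : Nat) : Nat :=
  if h : lo < hi then
    let mid := (lo + hi) / 2
    if PySem.List.pyGetD tempos (mid : Int) 0 ≤ v then insereBinPos tempos v (mid + 1) hi
    else insereBinPos tempos v lo mid
  else lo
termination_by hi - lo
decreasing_by
  · omega
  · omega

def excedeAtendimento_alt (caixa : Int) (clientes : List (Int × Int)) : Int :=
  (clientes.foldl
    (fun (st : List Int × Int) cliente =>
      let tempos := st.1
      let e0 := (PySem.List.pyGet? tempos 0).getD 0 - cliente.1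
      let espera := if e0 < 0 then 0 else e0
      let excederam := if espera > 20 then st.2 + 1 else st.2
      let novo := cliente.1 + cliente.2 + espera
      let resto := tempos.drop 1          -- del tempos[0]
      let pos := insereBinPos resto novo 0 resto.length
      (PySem.List.insert resto (pos : Int) novo, excederam))
    (List.replicate caixa.toNat 0, 0)).2

-- ===== PRECONDITION & SPEC =====
-- A (and B) raise IndexError reading caixas[proximo] / tempos[0] when there is a
-- client but no counter (caixa ≤ 0 gives [0]*caixa = []); exactly those inputs are excluded.
def Pre_excedeAtendimento (caixa : Int) (clientes : List (Int × Int)) : Prop :=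
  clientes = [] ∨ 1 ≤ caixa
instance (caixa : Int) (clientes : List (Int × Int)) : Decidable (Pre_excedeAtendimento caixa clientes) := by unfold Pre_excedeAtendimento; infer_instance

def pvWitness_excedeAtendimento : Int × (List (Int × Int)) := (2, [(0, 10), (5, 30), (6, 1)])

def Spec_excedeAtendimento (caixa : Int) (clientes : List (Int × Int)) (out : Int) : Prop := out = excedeAtendimento_alt caixa clientes
instance (caixa : Int) (clientes : List (Int × Int)) (out : Int) : Decidable (Spec_excedeAtendimento caixa clientes out) := by unfold Spec_excedeAtendimento; infer_instance

-- ===== CLAIM (what is proved, stated in full; the proofs are below) =====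
def Claim_equal_excedeAtendimento : Prop := ∀ (caixa : Int) (clientes : List (Int × Int)), Dom_excedeAtendimento caixa clientes → Pre_excedeAtendimento caixa clientes → Spec_excedeAtendimento caixa clientes (excedeAtendimento caixa clientes)

-- ===== LEMMAS AND PROOFS =====

-- proof-side description of where the binary search inserts: before the first
-- element greater than v (on a sorted list this is the same position)
def insereOrdenado (xs : List Int) (v : Int) : List Int :=
  xs.takeWhile (· ≤ v) ++ v :: xs.dropWhile (· ≤ v)

-- proof-side view of proximoCaixa's scan, cut off after the first b indices
def proximoFold (caixas : List Int) (b : Nat) : Int :=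
  (PySem.List.pyRange 0 (b : Int) 1).foldl
    (fun menorTempo i =>
      if PySem.List.pyGetD caixas i 0 < PySem.List.pyGetD caixas menorTempo 0 then i
      else menorTempo) 0


-- unfolding form of the insertion
lemma insereOrdenado_cons (x : Int) (xs : List Int) (v : Int) :
    insereOrdenado (x :: xs) v =
      if x ≤ v then x :: insereOrdenado xs v else v :: x :: xs := by
  by_cases h : x ≤ v <;> simp [insereOrdenado, List.takeWhile, List.dropWhile, h]

lemma insereOrdenado_perm (xs : List Int) (v : Int) :
    (insereOrdenado xs v).Perm (v :: xs) := by
  unfold insereOrdenado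
  have h := List.perm_middle (a := v)
    (l₁ := List.takeWhile (fun x => decide (x ≤ v)) xs)
    (l₂ := List.dropWhile (fun x => decide (x ≤ v)) xs)
  rwa [List.takeWhile_append_dropWhile] at h

lemma insereOrdenado_sorted (xs : List Int) (v : Int)
    (h : xs.Pairwise (· ≤ ·)) : (insereOrdenado xs v).Pairwise (· ≤ ·) := by
  induction xs with
  | nil => simp [insereOrdenado]
  | cons x xs ih =>
    rw [List.pairwise_cons] at h
    rw [insereOrdenado_cons]
    by_cases hx : x ≤ v
    · simp only [hx, if_true, List.pairwise_cons]
      refine ⟨?_, ih h.2⟩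
      intro b hb
      rcases List.mem_cons.mp ((insereOrdenado_perm xs v).mem_iff.mp hb) with hb' | hb'
      · exact hb' ▸ hx
      · exact h.1 b hb'
    · simp only [hx, if_false, List.pairwise_cons]
      refine ⟨?_, h⟩
      intro b hb
      rcases List.mem_cons.mp hb with hb' | hb'
      · omega
      · have := h.1 b hb'; omega

-- invariant tying A's state (caixas, proximo) to B's sorted list tempos
def StInv (caixas : List Int) (proximo : Int) (tempos : List Int) : Prop :=
  tempos.Perm caixas ∧ tempos.Pairwise (· ≤ ·) ∧
  0 ≤ proximo ∧ proximo < caixas.length ∧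
  ∀ x ∈ caixas, PySem.List.pyGetD caixas proximo 0 ≤ x

-- the fold of proximoCaixa over the first b indices yields an in-range index
-- minimal among those indices
lemma proximoCaixa_aux (caixas : List Int) (hne : caixas ≠ []) (b : Nat)
    (hb : b ≤ caixas.length) :
    0 ≤ proximoFold caixas b ∧ proximoFold caixas b < (caixas.length : Int) ∧
    ∀ j : Int, 0 ≤ j → j < (b : Int) →
      PySem.List.pyGetD caixas (proximoFold caixas b) 0 ≤ PySem.List.pyGetD caixas j 0 := by
  induction b with
  | zero =>
    have hl : caixas.length ≠ 0 := by simpa using hne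
    refine ⟨?_, ?_, ?_⟩ <;>
      simp [proximoFold, PySem.List.pyRange_one_eq_nil (by omega : (0:Int) ≤ 0)] <;> omega
  | succ b ih =>
    have hb' : b ≤ caixas.length := by omega
    obtain ⟨h0, h1, h2⟩ := ih hb'
    have hrange : PySem.List.pyRange 0 ((b:Int)+1) 1
        = PySem.List.pyRange 0 (b:Int) 1 ++ [(b:Int)] :=
      PySem.List.pyRange_one_succ_right (by positivity)
    have hfold : proximoFold caixas (b+1) =
        (if PySem.List.pyGetD caixas (b:Int) 0 <
            PySem.List.pyGetD caixas (proximoFold caixas b) 0 then (b:Int)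
         else proximoFold caixas b) := by
      unfold proximoFold
      push_cast
      rw [hrange, List.foldl_append]
      rfl
    rw [hfold]
    by_cases hc : PySem.List.pyGetD caixas (b:Int) 0 <
        PySem.List.pyGetD caixas (proximoFold caixas b) 0
    · simp only [hc, if_true]
      refine ⟨by positivity, by exact_mod_cast hb, ?_⟩
      intro j hj0 hj1
      by_cases hjb : j < (b:Int)
      · exact le_trans (le_of_lt hc) (h2 j hj0 hjb)
      · have : j = (b:Int) := by omega
        simp [this]
    · simp only [hc, if_false]
      refine ⟨h0, h1, ?_⟩
      intro j hj0 hj1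
      by_cases hjb : j < (b:Int)
      · exact h2 j hj0 hjb
      · have : j = (b:Int) := by omega
        rw [this]
        omega

lemma proximoCaixa_eq_fold (caixas : List Int) :
    proximoCaixa caixas = proximoFold caixas caixas.length := rfl

-- proximoCaixa returns an in-range index of a minimum
lemma proximoCaixa_min (caixas : List Int) (hne : caixas ≠ []) :
    0 ≤ proximoCaixa caixas ∧ proximoCaixa caixas < (caixas.length : Int) ∧
    ∀ x ∈ caixas, PySem.List.pyGetD caixas (proximoCaixa caixas) 0 ≤ x := by
  obtain ⟨h0, h1, h2⟩ := proximoCaixa_aux caixas hne caixas.length le_rfl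
  rw [proximoCaixa_eq_fold]
  refine ⟨h0, h1, ?_⟩
  intro x hx
  obtain ⟨j, hj, hxj⟩ := List.mem_iff_getElem.mp hx
  have := h2 (j : Int) (by positivity) (by exact_mod_cast hj)
  rw [PySem.List.pyGetD_eq_getElem (i := (j:Int)) caixas 0 (by positivity) (by exact_mod_cast hj)] at this
  simpa [hxj] using this

-- under the invariant tempos is nonempty with head = caixas[proximo]
lemma stInv_head (caixas : List Int) (proximo : Int) (tempos : List Int)
    (h : StInv caixas proximo tempos) :
    ∃ t ts, tempos = t :: ts ∧ t = PySem.List.pyGetD caixas proximo 0 := by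
  obtain ⟨hperm, hsort, hp0, hp1, hmin⟩ := h
  have hlen : tempos.length = caixas.length := hperm.length_eq
  have hne : tempos ≠ [] := by
    intro he
    rw [he] at hlen
    simp at hlen
    omega
  obtain ⟨t, ts, rfl⟩ := List.exists_cons_of_ne_nil hne
  refine ⟨t, ts, rfl, ?_⟩
  have hm : PySem.List.pyGetD caixas proximo 0 ∈ caixas := by
    rw [PySem.List.pyGetD_eq_getElem caixas 0 hp0 hp1]
    exact List.getElem_mem _
  have hmt : PySem.List.pyGetD caixas proximo 0 ∈ t :: ts := hperm.mem_iff.mpr hm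
  have ht : t ∈ caixas := hperm.mem_iff.mp (List.mem_cons_self)
  have h1 : PySem.List.pyGetD caixas proximo 0 ≤ t := hmin t ht
  rcases List.mem_cons.mp hmt with he | he
  · omega
  · have := (List.pairwise_cons.mp hsort).1 _ he
    omega

lemma stInv_step (caixas : List Int) (proximo : Int) (tempos : List Int)
    (h : StInv caixas proximo tempos) (v : Int) :
    StInv (PySem.List.pySetD caixas proximo v)
      (proximoCaixa (PySem.List.pySetD caixas proximo v))
      (insereOrdenado (tempos.drop 1) v) := by
  obtain ⟨t, ts, rfl, hval⟩ := stInv_head caixas proximo tempos h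
  obtain ⟨hperm, hsort, hp0, hp1, hmin⟩ := h
  have hset : PySem.List.pySetD caixas proximo v = caixas.set proximo.toNat v :=
    PySem.List.pySetD_of_nonneg caixas v hp0
  have hnlen : proximo.toNat < caixas.length := by omega
  -- decompositions of caixas and of its update
  have hdecomp : caixas = caixas.take proximo.toNat ++ caixas[proximo.toNat] :: caixas.drop (proximo.toNat+1) := by
    conv_lhs => rw [← List.take_append_drop proximo.toNat caixas, List.drop_eq_getElem_cons hnlen]
  have hsetdecomp : caixas.set proximo.toNat v = caixas.take proximo.toNat ++ v :: caixas.drop (proximo.toNat+1) :=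
    List.set_eq_take_cons_drop v hnlen
  have hcv : caixas[proximo.toNat] = t := by
    rw [hval, PySem.List.pyGetD_eq_getElem caixas 0 hp0 hp1]
  -- permutation bookkeeping
  have hperm1 : caixas.Perm (t :: (caixas.take proximo.toNat ++ caixas.drop (proximo.toNat+1))) := by
    rw [← hcv]
    conv_lhs => rw [hdecomp]
    exact List.perm_middle
  have hts : ts.Perm (caixas.take proximo.toNat ++ caixas.drop (proximo.toNat+1)) :=
    (hperm.trans hperm1).cons_inv
  have hperm' : (insereOrdenado ts v).Perm (caixas.set proximo.toNat v) := by
    refine ((insereOrdenado_perm ts v).trans (hts.cons v)).trans ?_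
    rw [hsetdecomp]
    exact List.perm_middle.symm
  have hne' : caixas.set proximo.toNat v ≠ [] := by
    have hl : (caixas.set proximo.toNat v).length = caixas.length := by simp
    intro he
    rw [he] at hl
    simp at hl
    omega
  obtain ⟨g0, g1, g2⟩ := proximoCaixa_min (caixas.set proximo.toNat v) hne'
  refine ⟨?_, ?_, ?_, ?_, ?_⟩
  · simpa [hset] using hperm'
  · exact insereOrdenado_sorted ts v (List.pairwise_cons.mp hsort).2
  · simpa [hset] using g0
  · simpa [hset] using g1
  · simpa [hset] using g2

-- sorted lists are monotone in getD inside the range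
lemma sorted_getD_mono (ts : List Int) (hs : ts.Pairwise (· ≤ ·))
    (i j : Nat) (hij : i ≤ j) (hj : j < ts.length) :
    ts.getD i 0 ≤ ts.getD j 0 := by
  rcases Nat.lt_or_ge i j with hlt | hge
  · have := (List.pairwise_iff_getElem.mp hs) i j (by omega) hj hlt
    rwa [List.getD_eq_getElem _ _ (by omega), List.getD_eq_getElem _ _ hj]
  · have : i = j := by omega
    rw [this]

-- the binary search returns the boundary position: everything before it is ≤ v,
-- everything from it on is > v
lemma insereBinPos_spec (ts : List Int) (hs : ts.Pairwise (· ≤ ·)) (v : Int) :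
    ∀ (fuel lo hi : Nat), hi - lo ≤ fuel → lo ≤ hi → hi ≤ ts.length →
    (∀ j : Nat, j < lo → ts.getD j 0 ≤ v) →
    (∀ j : Nat, hi ≤ j → j < ts.length → v < ts.getD j 0) →
    insereBinPos ts v lo hi ≤ ts.length ∧
    (∀ j : Nat, j < insereBinPos ts v lo hi → ts.getD j 0 ≤ v) ∧
    (∀ j : Nat, insereBinPos ts v lo hi ≤ j → j < ts.length → v < ts.getD j 0) := by
  intro fuel
  induction fuel with
  | zero =>
    intro lo hi hfuel hlohi hhi h1 h2
    have : lo = hi := by omega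
    rw [insereBinPos]
    simp only [show ¬ lo < hi by omega, dif_neg, not_false_iff]
    exact ⟨by omega, h1, fun j hj => h2 j (by omega)⟩
  | succ fuel ih =>
    intro lo hi hfuel hlohi hhi h1 h2
    rw [insereBinPos]
    by_cases hc : lo < hi
    · simp only [hc, dif_pos]
      have hmid1 : lo ≤ (lo + hi) / 2 := by omega
      have hmid2 : (lo + hi) / 2 < hi := by omega
      have hmlen : (lo + hi) / 2 < ts.length := by omega
      have hget : PySem.List.pyGetD ts (((lo + hi) / 2 : Nat) : Int) 0
          = ts.getD ((lo + hi) / 2) 0 := PySem.List.pyGetD_natCast ts _ 0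
      by_cases hv : PySem.List.pyGetD ts (((lo + hi) / 2 : Nat) : Int) 0 ≤ v
      · simp only [hv, if_pos]
        refine ih ((lo + hi) / 2 + 1) hi (by omega) (by omega) hhi ?_ h2
        intro j hj
        have : ts.getD j 0 ≤ ts.getD ((lo + hi) / 2) 0 :=
          sorted_getD_mono ts hs j _ (by omega) hmlen
        rw [hget] at hv
        omega
      · simp only [hv, if_neg, not_false_iff]
        refine ih lo ((lo + hi) / 2) (by omega) (by omega) (by omega) h1 ?_
        intro j hj hjlen
        have : ts.getD ((lo + hi) / 2) 0 ≤ ts.getD j 0 :=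
          sorted_getD_mono ts hs _ j hj hjlen
        rw [hget] at hv
        omega
    · simp only [hc, dif_neg, not_false_iff]
      exact ⟨by omega, h1, fun j hj hjl => h2 j (by omega) hjl⟩

-- splicing v in at the boundary position is exactly the takeWhile/dropWhile splice
lemma splice_eq_insereOrdenado (ts : List Int) (v : Int) :
    ∀ (k : Nat), k ≤ ts.length →
    (∀ j : Nat, j < k → ts.getD j 0 ≤ v) →
    (∀ j : Nat, k ≤ j → j < ts.length → v < ts.getD j 0) →
    ts.take k ++ v :: ts.drop k = insereOrdenado ts v := by
  induction ts with
  | nil =>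
    intro k hk _ _
    simp at hk
    simp [hk, insereOrdenado]
  | cons x xs ih =>
    intro k hk h1 h2
    cases k with
    | zero =>
      have hx : v < x := by
        have := h2 0 (by omega) (by simp)
        simpa using this
      rw [insereOrdenado_cons]
      simp [show ¬ x ≤ v by omega]
    | succ k =>
      have hx : x ≤ v := by simpa using h1 0 (by omega)
      rw [insereOrdenado_cons]
      simp only [hx, if_true, List.take_succ_cons, List.drop_succ_cons, List.cons_append,
        List.cons.injEq, true_and]
      refine ih k (by simpa using hk) ?_ ?_
      · intro j hj
        simpa using h1 (j + 1) (by omega)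
      · intro j hj hjl
        have := h2 (j + 1) (by omega) (by simpa using hjl)
        simpa using this

-- on a sorted list, B's binary-search insertion is the ordered splice
lemma insereBin_eq (ts : List Int) (hs : ts.Pairwise (· ≤ ·)) (v : Int) :
    PySem.List.insert ts ((insereBinPos ts v 0 ts.length : Nat) : Int) v
      = insereOrdenado ts v := by
  obtain ⟨hk, h1, h2⟩ := insereBinPos_spec ts hs v ts.length 0 ts.length
    (by omega) (by omega) le_rfl (by omega) (by omega)
  rw [PySem.List.insert_natCast ts _ v hk]
  exact splice_eq_insereOrdenado ts v _ hk h1 h2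

lemma fold_agree (clientes : List (Int × Int)) :
    ∀ (caixas tempos : List Int) (proximo exc : Int),
    StInv caixas proximo tempos →
    (clientes.foldl
      (fun (st : List Int × Int × Int) cliente =>
        let caixas := st.1
        let proximo := st.2.1
        let excederam := st.2.2
        let e0 := PySem.List.pyGetD caixas proximo 0 - cliente.1
        let tempoEspera := if e0 < 0 then 0 else e0
        let caixas' := PySem.List.pySetD caixas proximo (cliente.1 + cliente.2 + tempoEspera)
        let proximo' := proximoCaixa caixas'
        let excederam' := if tempoEspera > 20 then excederam + 1 else excederam
        (caixas', proximo', excederam'))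
      (caixas, proximo, exc)).2.2 =
    (clientes.foldl
      (fun (st : List Int × Int) cliente =>
        let tempos := st.1
        let e0 := (PySem.List.pyGet? tempos 0).getD 0 - cliente.1
        let espera := if e0 < 0 then 0 else e0
        let excederam := if espera > 20 then st.2 + 1 else st.2
        let novo := cliente.1 + cliente.2 + espera
        let resto := tempos.drop 1
        let pos := insereBinPos resto novo 0 resto.length
        (PySem.List.insert resto (pos : Int) novo, excederam))
      (tempos, exc)).2 := by
  induction clientes with
  | nil => intro caixas tempos proximo exc _; rfl
  | cons c cs ih =>
    intro caixas tempos proximo exc h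
    obtain ⟨t, ts, rfl, hval⟩ := stInv_head caixas proximo tempos h
    simp only [List.foldl_cons]
    have hhead : (PySem.List.pyGet? (t :: ts) 0).getD 0 = PySem.List.pyGetD caixas proximo 0 := by
      rw [PySem.List.pyGet?_zero_cons]
      exact hval
    rw [hhead, show List.drop 1 (t :: ts) = ts from rfl]
    have hts : ts.Pairwise (· ≤ ·) := (List.pairwise_cons.mp h.2.1).2
    rw [insereBin_eq ts hts]
    have hstep := stInv_step caixas proximo (t :: ts) h
      (c.1 + c.2 + if PySem.List.pyGetD caixas proximo 0 - c.1 < 0 then 0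
        else PySem.List.pyGetD caixas proximo 0 - c.1)
    rw [show List.drop 1 (t :: ts) = ts from rfl] at hstep
    exact ih _ _ _ _ hstep

lemma stInv_init (k : Nat) (hk : 0 < k) :
    StInv (List.replicate k (0:Int)) 0 (List.replicate k (0:Int)) := by
  refine ⟨List.Perm.refl _, List.pairwise_replicate.mpr (by simp), le_refl 0, by simpa using hk, ?_⟩
  intro x hx
  rw [List.eq_of_mem_replicate hx]
  rw [PySem.List.pyGetD_eq_getElem _ 0 le_rfl (by simpa using hk)]
  simp

-- ===== VERDICT (by name: the statement is the Claim_ definition above) =====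
theorem excedeAtendimento_spec : Claim_equal_excedeAtendimento := by
  intro caixa clientes _ hpre
  unfold Spec_excedeAtendimento excedeAtendimento excedeAtendimento_alt
  rcases hpre with rfl | hpos
  · rfl
  · exact fold_agree clientes _ _ 0 0
      (stInv_init caixa.toNat (by omega))
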